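-- pv_equiv track=rewrite | github.com/YeonsuBaek/algorithm-test | 프로그래머스/unrated/155652. 둘만의 암호/둘만의 암호.py | solution
-- ===== SOURCE A (Python) =====
-- def solution(s, skip, index):
--     answer = []
--     alphabets = []
--
--     for a in range(26):
--         alphabet = chr(a + 97)
--         if alphabet not in list(skip):
--             alphabets.append(alphabet)
--
--     for a in list(s):
--         alphabet_index = alphabets.index(a) + index
--         if alphabet_index >= len(alphabets):
--             alphabet_index = alphabet_index % len(alphabets)
--         answer.append(alphabets[alphabet_index])
--
--     return "".join(answer)
-- ===== SOURCE B (Python) =====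
-- def solution(s, skip, index):
--     banned = set(skip)
--     n = sum(chr(a) not in banned for a in range(97, 123))
--     out = []
--     for c in s:
--         if c < 'a' or c > 'z' or c in banned:
--             raise ValueError(f"{c!r} is not a decodable letter")
--         rank = sum(chr(a) not in banned for a in range(97, ord(c)))
--         t = (rank + index) % n
--         for a in range(97, 123):
--             if chr(a) not in banned:
--                 if t == 0:
--                     out.append(chr(a))
--                     break
--                 t -= 1
--     return "".join(out)
-- ===== Notes on version B (the rewrite author's own statement) =====
-- stated objective: alternative
-- what changed: A materializes the reduced alphabet as a list and decodes each character with list.index plus (possibly modular) subscripting; B builds no list at all: it counts the non-skip letters below the character to get its rank, reduces rank+index modulo the total non-skip count, and emits the answer by a counting selection scan over the fixed a-z range.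
import Mathlib
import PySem

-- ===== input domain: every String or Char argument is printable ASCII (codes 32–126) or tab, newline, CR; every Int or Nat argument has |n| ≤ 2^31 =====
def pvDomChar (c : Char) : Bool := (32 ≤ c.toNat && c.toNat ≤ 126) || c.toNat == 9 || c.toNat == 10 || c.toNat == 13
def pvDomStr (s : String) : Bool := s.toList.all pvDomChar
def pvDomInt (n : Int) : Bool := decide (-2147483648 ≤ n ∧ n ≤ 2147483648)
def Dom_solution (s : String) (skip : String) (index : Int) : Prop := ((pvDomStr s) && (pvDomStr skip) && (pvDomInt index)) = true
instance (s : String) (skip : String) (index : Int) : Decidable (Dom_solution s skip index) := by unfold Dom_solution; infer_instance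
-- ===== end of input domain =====

-- B never materializes the reduced alphabet: instead of A's list + .index + subscript it
-- counts each character's rank among non-skip letters and emits the answer by a counting
-- selection scan over a–z (alternative decomposition, similar cost).

-- ===== PORT A =====
def solution (s : String) (skip : String) (index : Int) : String :=
  let alphabets : List Char :=
    (PySem.List.pyRange 0 26 1).foldl (fun alphabets a =>
      let alphabet := Char.ofNat (a.toNat + 97)
      if alphabet ∈ skip.toList then alphabets else alphabets ++ [alphabet]) []
  let answer : List Char :=
    s.toList.foldl (fun answer a =>
      match PySem.List.index? alphabets a with
      | none => answer  -- alphabets.index raises ValueError here: outside Pre_solution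
      | some idx =>
        let ai : Int := (idx : Int) + index
        let ai : Int :=
          if (alphabets.length : Int) ≤ ai then PySem.Int.mod ai (alphabets.length : Int) else ai
        match PySem.List.pyGet? alphabets ai with
        | none => answer  -- alphabets[ai] raises IndexError here: outside Pre_solution
        | some ch => answer ++ [ch]) []
  String.ofList answer

-- ===== PORT B =====
-- the inner 'for a in range(97,123): if chr(a) not in banned: if t == 0: append; break else t -= 1'
def bSelect (skip : String) : List Int → Int → Option Char
  | [], _ => none
  | a :: rest, t =>
    if !(skip.toList.contains (Char.ofNat a.toNat)) then
      if t = 0 then some (Char.ofNat a.toNat)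
      else bSelect skip rest (t - 1)
    else bSelect skip rest t

def solution_alt (s : String) (skip : String) (index : Int) : String :=
  let n : Int := (PySem.List.pyRange 97 123 1).foldl
    (fun acc a => acc + if !(skip.toList.contains (Char.ofNat a.toNat)) then 1 else 0) 0
  let out : List Char := s.toList.foldl (fun out c =>
    if c < 'a' ∨ 'z' < c ∨ skip.toList.contains c then
      out  -- B raises ValueError here: outside Pre_solution
    else
      let rank : Int := (PySem.List.pyRange 97 (c.toNat : Int) 1).foldl
        (fun acc a => acc + if !(skip.toList.contains (Char.ofNat a.toNat)) then 1 else 0) 0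
      let t : Int := PySem.Int.mod (rank + index) n
      out ++ (bSelect skip (PySem.List.pyRange 97 123 1) t).toList) []
  String.ofList out

-- ===== PRECONDITION & SPEC =====
-- the reduced alphabet: the lowercase letters not occurring in skip (independent of both ports)
def pvLetters (skip : String) : List Char :=
  ((List.range 26).map (fun a => Char.ofNat (a + 97))).filter (fun c => !(skip.toList.contains c))

-- Pre_: every character of s is a lowercase letter not in skip (else A's alphabets.index
-- raises ValueError), and its reduced-alphabet position plus index is ≥ -len(reduced alphabet)
-- (else A's alphabets[...] raises IndexError) — exactly the inputs where the Python A returns.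
def Pre_solution (s : String) (skip : String) (index : Int) : Prop :=
  (s.toList.all (fun c => (pvLetters skip).contains c &&
    decide (-((pvLetters skip).length : Int) ≤ ((pvLetters skip).idxOf c : Int) + index))) = true
instance (s : String) (skip : String) (index : Int) : Decidable (Pre_solution s skip index) := by
  unfold Pre_solution; infer_instance

def pvWitness_solution : String × String × Int := ("abc", "elzqr", -4)

def Spec_solution (s : String) (skip : String) (index : Int) (out : String) : Prop := out = solution_alt s skip index
instance (s : String) (skip : String) (index : Int) (out : String) : Decidable (Spec_solution s skip index out) := by unfold Spec_solution; infer_instance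

-- ===== CLAIM (what is proved, stated in full; the proofs are below) =====
def Claim_equal_solution : Prop := ∀ (s : String) (skip : String) (index : Int), Dom_solution s skip index → Pre_solution s skip index → Spec_solution s skip index (solution s skip index)

-- ===== LEMMAS AND PROOFS =====

-- for n < 55296, (Char.ofNat n).toNat = n (the code point is a valid char)
theorem pvChar_toNat {n : Nat} (h : n < 55296) : (Char.ofNat n).toNat = n := by
  rw [Char.toNat_ofNat, if_pos (Or.inl h)]

-- A's first loop builds exactly pvLetters skip
theorem pvA_alphabets (skip : String) :
    (PySem.List.pyRange 0 26 1).foldl (fun alphabets a =>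
      let alphabet := Char.ofNat (a.toNat + 97)
      if alphabet ∈ skip.toList then alphabets else alphabets ++ [alphabet]) []
    = pvLetters skip := by
  rw [show ((26:Int)) = ((26:Nat):Int) from rfl, PySem.List.pyRange_zero_nat, List.foldl_map]
  rw [PySem.List.foldl_congr_mem _ _
    (fun acc (k:Nat) => if (!(skip.toList.contains (Char.ofNat (k + 97)))) = true
        then acc ++ [Char.ofNat (k + 97)] else acc) _ ?_]
  · rw [PySem.List.foldl_append_if, pvLetters, List.filter_map]
    simp [Function.comp_def]
  · intro acc x _
    simp only [Int.toNat_natCast]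
    by_cases h : Char.ofNat (x + 97) ∈ skip.toList <;> simp [h]

-- the common value both programs produce for one character c of s
def pvDec (L : List Char) (index : Int) (c : Char) : Char :=
  L.getD (((L.idxOf c : Int) + index) % (L.length : Int)).toNat c

theorem pvIdxOf? (v : Char) (xs : List Char) (h : v ∈ xs) : List.idxOf? v xs = some (xs.idxOf v) := by
  obtain ⟨i, hi⟩ := Option.isSome_iff_exists.mp (by
    rw [Option.isSome_iff_ne_none]; intro hn; exact (List.idxOf?_eq_none_iff.mp hn) h)
  rw [hi, List.idxOf_eq_getD_idxOf?, hi]; rfl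

theorem pvGet_of_range (L : List Char) (c : Char) (j : Int) (h0 : 0 ≤ j) (hlt : j < (L.length : Int)) :
    PySem.List.pyGet? L j = some (L.getD j.toNat c) := by
  simp only [PySem.List.pyGet?, PySem.List.pyIdx?, if_pos h0, hlt, if_pos]
  have hj : j.toNat < L.length := by omega
  simp [List.getElem?_eq_getElem hj]

theorem pvGet_of_neg (L : List Char) (c : Char) (j : Int) (h0 : j < 0) (hlo : -(L.length : Int) ≤ j) :
    PySem.List.pyGet? L j = some (L.getD (j + (L.length : Int)).toNat c) := by
  simp only [PySem.List.pyGet?, PySem.List.pyIdx?, if_neg (by omega : ¬ (0:Int) ≤ j)]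
  rw [if_pos (by omega : -((L.length : Int)) ≤ j)]
  have heq : L.length - (-j).toNat = (j + (L.length : Int)).toNat := by omega
  have hlt : (j + (L.length : Int)).toNat < L.length := by omega
  rw [heq]
  simp [List.getElem?_eq_getElem hlt]

-- A's per-character computation yields pvDec
theorem pvA_char (L : List Char) (c : Char) (index : Int) (hc : c ∈ L)
    (hlo : -(L.length : Int) ≤ (L.idxOf c : Int) + index) :
    (if (L.length : Int) ≤ (L.idxOf c : Int) + index
       then PySem.List.pyGet? L (PySem.Int.mod ((L.idxOf c : Int) + index) (L.length : Int))
       else PySem.List.pyGet? L ((L.idxOf c : Int) + index))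
    = some (pvDec L index c) := by
  have hn : 0 < (L.length : Int) := by
    have := List.idxOf_lt_length_of_mem hc; omega
  set i : Int := (L.idxOf c : Int) with hi
  have hiub : i < (L.length : Int) := by
    have := List.idxOf_lt_length_of_mem hc; omega
  set n : Int := (L.length : Int) with hn'
  by_cases h1 : n ≤ i + index
  · rw [if_pos h1, PySem.Int.mod_eq_emod_of_pos hn]
    rw [pvGet_of_range L c _ (Int.emod_nonneg _ (by omega)) (Int.emod_lt_of_pos _ hn)]
    rfl
  · rw [if_neg h1]
    by_cases h2 : 0 ≤ i + index
    · rw [pvGet_of_range L c _ h2 (by omega), pvDec]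
      rw [Int.emod_eq_of_lt h2 (by omega)]
    · have hmod : (i + index) % n = i + index + n := by
        have h3 : (i + index + n) % n = (i + index) % n := by
          have h4 := Int.add_mul_emod_self_left (i + index) n 1
          rw [mul_one] at h4
          exact h4
        rw [← h3, Int.emod_eq_of_lt (by omega) (by omega)]
      rw [pvDec, hmod, pvGet_of_neg L c _ (by omega) (by omega)]

-- B's 0/1-counting folds count the non-skip letters of an initial segment of a–z
theorem pvCount (skip : String) (m : Nat) (hm : m ≤ 26) :
    (PySem.List.pyRange 97 ((97 + m : Nat) : Int) 1).foldl
      (fun acc a => acc + if !(skip.toList.contains (Char.ofNat a.toNat)) then 1 else 0) 0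
    = ((((List.range m).map (fun k => Char.ofNat (k + 97))).countP
        (fun c => !(skip.toList.contains c)) : Nat) : Int) := by
  rw [PySem.List.foldl_add, PySem.List.pyRange_one, List.map_map]
  have h1 : (((97 + m : Nat) : Int) - 97).toNat = m := by omega
  rw [h1]
  have h2 : ((fun (a : Int) => if (!skip.toList.contains (Char.ofNat a.toNat)) = true then (1:Int) else 0) ∘ fun (k : Nat) => 97 + (k:Int))
      = fun (k : Nat) => if (!skip.toList.contains (Char.ofNat (k + 97))) = true then (1:Int) else 0 := by
    funext k
    have : ((97 : Int) + (k : Nat)).toNat = k + 97 := by omega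
    simp [Function.comp, this]
  rw [h2, PySem.List.sum_map_ite_one_zero, List.countP_map]
  simp only [zero_add, Nat.cast_inj]
  apply List.countP_congr
  intro k hk
  simp [Function.comp]

-- generic selection-scan lemma: bSelect walks xs counting down t over the filtered elements
theorem pvSelect_gen (skip : String) (xs : List Int) (t : Int) (ht : 0 ≤ t) :
    bSelect skip xs t
    = ((xs.filter (fun (a : Int) => !(skip.toList.contains (Char.ofNat a.toNat))))[t.toNat]?).map
        (fun (a : Int) => Char.ofNat a.toNat) := by
  induction xs generalizing t with
  | nil => simp [bSelect]
  | cons a rest ih =>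
    by_cases hp : (!skip.toList.contains (Char.ofNat a.toNat)) = true
    · rw [bSelect, if_pos hp, List.filter_cons_of_pos (p := fun (a : Int) => !(skip.toList.contains (Char.ofNat a.toNat))) hp]
      by_cases ht0 : t = 0
      · subst ht0; simp
      · rw [if_neg ht0]
        have htn : t.toNat = (t - 1).toNat + 1 := by omega
        rw [htn, List.getElem?_cons_succ, ih (t - 1) (by omega)]
    · rw [bSelect, if_neg hp, List.filter_cons_of_neg (p := fun (a : Int) => !(skip.toList.contains (Char.ofNat a.toNat))) (by simpa using hp), ih t ht]

-- the selection scan over a–z yields the t-th letter of the reduced alphabet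
theorem pvSelect (skip : String) (t : Int) (ht : 0 ≤ t) :
    bSelect skip (PySem.List.pyRange 97 123 1) t = (pvLetters skip)[t.toNat]? := by
  rw [pvSelect_gen skip _ t ht, PySem.List.pyRange_one,
    show ((123:Int) - 97).toNat = 26 from rfl, List.filter_map, List.getElem?_map,
    Option.map_map, pvLetters, List.filter_map, List.getElem?_map]
  congr 1
  · funext k
    have h1 : ((97 : Int) + (k : Nat)).toNat = k + 97 := by omega
    simp [Function.comp, h1]

-- in a nodup list, the index of xs[i] in the filtered list is the number of kept elements before i
theorem pvIdxOf_filter (p : Char → Bool) :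
    ∀ (xs : List Char) (i : Nat) (h : i < xs.length), xs.Nodup → p xs[i] = true →
      (xs.filter p).idxOf xs[i] = ((xs.take i).filter p).length
  | x :: rest, 0, h, hnd, hp => by
    simp only [List.getElem_cons_zero] at hp ⊢
    rw [List.filter_cons_of_pos hp]
    simp
  | x :: rest, i + 1, h, hnd, hp => by
    simp only [List.getElem_cons_succ] at hp ⊢
    have hi : i < rest.length := by simpa using h
    have hne : x ≠ rest[i] := by
      intro he
      exact (List.nodup_cons.mp hnd).1 (he ▸ List.getElem_mem hi)
    have ih := pvIdxOf_filter p rest i hi (List.nodup_cons.mp hnd).2 hp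
    by_cases hx : p x = true
    · rw [List.filter_cons_of_pos hx, List.take_succ_cons, List.filter_cons_of_pos hx]
      rw [List.idxOf_cons_ne _ (by exact hne), ih]
      simp
    · rw [List.filter_cons_of_neg (by simpa using hx), List.take_succ_cons,
        List.filter_cons_of_neg (by simpa using hx), ih]

-- rank of c (count of non-skip letters below it) = its index in the reduced alphabet
theorem pvRank (skip : String) (c : Char) (hc : c ∈ pvLetters skip) :
    ((List.range (c.toNat - 97)).map (fun k => Char.ofNat (k + 97))).countP
      (fun c => !(skip.toList.contains c)) = (pvLetters skip).idxOf c := by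
  have hmem : c ∈ (List.range 26).map (fun a => Char.ofNat (a + 97)) :=
    List.mem_of_mem_filter hc
  obtain ⟨k, hk, hck⟩ := List.mem_map.mp hmem
  rw [List.mem_range] at hk
  have hct : c.toNat = k + 97 := by rw [← hck, pvChar_toNat (by omega)]
  have hbase_nd : ((List.range 26).map (fun a => Char.ofNat (a + 97))).Nodup := by
    apply List.Nodup.map_on _ (List.nodup_range)
    intro a ha b hb heq
    simp only [List.mem_range] at ha hb
    have := congrArg Char.toNat heq
    rw [pvChar_toNat (by omega), pvChar_toNat (by omega)] at this
    omega
  have hkl : k < ((List.range 26).map (fun a => Char.ofNat (a + 97))).length := by simpa using hk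
  have hgk : ((List.range 26).map (fun a => Char.ofNat (a + 97)))[k] = c := by
    simp [List.getElem_map, hck.symm]
  have hp : (fun c => !(skip.toList.contains c)) ((List.range 26).map (fun a => Char.ofNat (a + 97)))[k] = true := by
    rw [hgk]
    have := List.of_mem_filter hc
    simpa using this
  have := pvIdxOf_filter (fun c => !(skip.toList.contains c)) _ k hkl hbase_nd hp
  rw [hgk] at this
  rw [pvLetters, this, ← List.map_take, List.take_range, Nat.min_eq_left (by omega),
    show c.toNat - 97 = k by omega, List.countP_eq_length_filter]

-- B's per-character computation yields pvDec
theorem pvB_char (skip : String) (index : Int) (c : Char) (hc : c ∈ pvLetters skip) :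
    (bSelect skip (PySem.List.pyRange 97 123 1)
      (PySem.Int.mod
        ((PySem.List.pyRange 97 (c.toNat : Int) 1).foldl
          (fun acc a => acc + if !(skip.toList.contains (Char.ofNat a.toNat)) then 1 else 0) 0 + index)
        ((PySem.List.pyRange 97 123 1).foldl
          (fun acc a => acc + if !(skip.toList.contains (Char.ofNat a.toNat)) then 1 else 0) 0))).toList
    = [pvDec (pvLetters skip) index c] := by
  obtain ⟨k, hk, hck⟩ := List.mem_map.mp (List.mem_of_mem_filter hc)
  rw [List.mem_range] at hk
  have hct : c.toNat = k + 97 := by rw [← hck, pvChar_toNat (by omega)]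
  have hn : (PySem.List.pyRange 97 123 1).foldl
      (fun acc a => acc + if !(skip.toList.contains (Char.ofNat a.toNat)) then 1 else 0) 0
      = ((pvLetters skip).length : Int) := by
    rw [show (123:Int) = ((97 + 26 : Nat) : Int) by norm_num, pvCount skip 26 (by omega),
      List.countP_eq_length_filter]
    rfl
  have hrank : (PySem.List.pyRange 97 (c.toNat : Int) 1).foldl
      (fun acc a => acc + if !(skip.toList.contains (Char.ofNat a.toNat)) then 1 else 0) 0
      = ((pvLetters skip).idxOf c : Int) := by
    rw [show (c.toNat : Int) = ((97 + (c.toNat - 97) : Nat) : Int) by omega,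
      pvCount skip (c.toNat - 97) (by omega), pvRank skip c hc]
  rw [hn, hrank]
  have hlen : 0 < (pvLetters skip).length := List.length_pos_of_mem hc
  have ht0 : 0 ≤ PySem.Int.mod (((pvLetters skip).idxOf c : Int) + index)
      ((pvLetters skip).length : Int) := PySem.Int.mod_nonneg _ (by omega)
  rw [pvSelect skip _ ht0, PySem.Int.mod_eq_emod_of_pos (by omega : (0:Int) < ((pvLetters skip).length : Int))]
  have hlt : ((((pvLetters skip).idxOf c : Int) + index) % ((pvLetters skip).length : Int)).toNat
      < (pvLetters skip).length := by
    have h1 := Int.emod_lt_of_pos (((pvLetters skip).idxOf c : Int) + index)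
      (by omega : (0:Int) < ((pvLetters skip).length : Int))
    have h2 := Int.emod_nonneg (((pvLetters skip).idxOf c : Int) + index)
      (by omega : ((pvLetters skip).length : Int) ≠ 0)
    omega
  rw [List.getElem?_eq_getElem hlt]
  simp [pvDec, List.getD_eq_getElem?_getD, List.getElem?_eq_getElem hlt]

-- ===== VERDICT (by name: the statement is the Claim_ definition above) =====
theorem solution_spec : Claim_equal_solution := by
  intro s skip index _hdom hpre0
  have hpre : ∀ c ∈ s.toList, c ∈ pvLetters skip ∧
      -((pvLetters skip).length : Int) ≤ ((pvLetters skip).idxOf c : Int) + index := by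
    intro c hc
    have h := List.all_eq_true.mp hpre0 c hc
    simp only [Bool.and_eq_true, List.contains_iff_mem, decide_eq_true_eq] at h
    exact h
  unfold Spec_solution
  simp only [solution, solution_alt]
  rw [pvA_alphabets]
  rw [PySem.List.foldl_congr_mem _ _
    (fun answer a => answer ++ [pvDec (pvLetters skip) index a]) _ (by
      intro acc x hx
      obtain ⟨hmem, hbound⟩ := hpre x hx
      simp only
      rw [PySem.List.index?_eq_idxOf?, pvIdxOf? x (pvLetters skip) hmem]
      simp only
      rw [apply_ite (PySem.List.pyGet? (pvLetters skip)),
        pvA_char (pvLetters skip) x index hmem hbound]),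
    ]
  have hBfold : s.toList.foldl (fun out c =>
      if c < 'a' ∨ 'z' < c ∨ skip.toList.contains c then out
      else out ++ (bSelect skip (PySem.List.pyRange 97 123 1)
        (PySem.Int.mod
          ((PySem.List.pyRange 97 (c.toNat : Int) 1).foldl
            (fun acc a => acc + if !(skip.toList.contains (Char.ofNat a.toNat)) then 1 else 0) 0 + index)
          ((PySem.List.pyRange 97 123 1).foldl
            (fun acc a => acc + if !(skip.toList.contains (Char.ofNat a.toNat)) then 1 else 0) 0))).toList) []
      = s.toList.foldl (fun out c => out ++ [pvDec (pvLetters skip) index c]) [] := by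
    apply PySem.List.foldl_congr_mem
    intro acc x hx
    have hmem := (hpre x hx).1
    obtain ⟨k, hk, hck⟩ := List.mem_map.mp (List.mem_of_mem_filter hmem)
    rw [List.mem_range] at hk
    have hval : x.toNat = k + 97 := by rw [← hck, pvChar_toNat (by omega)]
    have hna : ¬ (x < 'a' ∨ 'z' < x ∨ skip.toList.contains x = true) := by
      have hcontains : skip.toList.contains x = false := by
        have := List.of_mem_filter hmem
        simpa using this
      intro hor
      rcases hor with h | h | h
      · exact absurd (show (97 : Nat) ≤ x.toNat by omega) (by simpa [Char.lt_def, Char.le_def] using h)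
      · exact absurd (show x.toNat ≤ (122 : Nat) by omega) (by simpa [Char.lt_def, Char.le_def] using h)
      · rw [hcontains] at h
        exact Bool.false_ne_true h
    rw [if_neg hna, pvB_char skip index x hmem]
  rw [hBfold]
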